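-- pv_equiv track=rewrite | github.com/EllenMHuffman/advent_of_code | 2022/12.py | find_targets
-- ===== SOURCE A (Python) =====
-- START = ord("S")
--
-- END = ord("E")
--
-- def find_targets(grid):
--     start = None
--     end = None
--     for i, row in enumerate(grid):
--         for j, elevation in enumerate(row):
--             if elevation == START:
--                 start = (i, j)
--             if elevation == END:
--                 end = (i, j)
--     return start, end
-- ===== SOURCE B (Python) =====
-- START = ord("S")
--
-- END = ord("E")
--
-- def _locate(grid, target):
--     for i, row in enumerate(grid):
--         for j, elevation in enumerate(row):
--             if elevation == target:
--                 return (i, j)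
--     return None
--
-- def find_targets(grid):
--     return _locate(grid, START), _locate(grid, END)
-- ===== Notes on version B (the rewrite author's own statement) =====
-- stated objective: simpler
-- what changed: One combined scan that keeps overwriting both last-seen positions is replaced by two independent early-returning searches, one per marker; Pre_ excludes grids containing a duplicated marker (more than one S or more than one E), where which occurrence wins is an unspecified corner (A keeps the last, B the first).
-- outside the precondition, e.g. on find_targets([[83, 83]]): A returns ((0, 1), None), B returns ((0, 0), None); on find_targets([[69, 1], [2, 69]]): A returns (None, (1, 1)), B returns (None, (0, 0))
import Mathlib
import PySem

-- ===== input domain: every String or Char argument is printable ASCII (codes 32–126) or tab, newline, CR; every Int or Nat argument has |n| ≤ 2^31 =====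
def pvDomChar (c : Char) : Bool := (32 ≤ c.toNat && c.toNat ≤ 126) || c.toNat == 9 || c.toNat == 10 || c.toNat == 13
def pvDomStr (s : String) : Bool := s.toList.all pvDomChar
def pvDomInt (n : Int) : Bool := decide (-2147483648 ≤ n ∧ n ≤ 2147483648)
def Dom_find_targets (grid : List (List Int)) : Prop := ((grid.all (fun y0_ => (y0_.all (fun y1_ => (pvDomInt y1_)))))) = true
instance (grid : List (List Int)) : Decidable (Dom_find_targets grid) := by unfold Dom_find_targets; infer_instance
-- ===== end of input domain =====

-- B replaces A's single combined scan (which overwrites the last-seen position of both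
-- markers at once) by two independent early-returning searches, one per marker.
-- ===== PORT A =====
def stepCell (i : Int) (acc : Option (Int × Int) × Option (Int × Int)) (je : Int × Int) :
    Option (Int × Int) × Option (Int × Int) :=
  let acc1 := if je.2 = 83 then (some (i, je.1), acc.2) else acc
  if je.2 = 69 then (acc1.1, some (i, je.1)) else acc1

def find_targets (grid : List (List Int)) : (Option (Int × Int)) × (Option (Int × Int)) :=
  (PySem.List.enumerate grid).foldl
    (fun acc ir => (PySem.List.enumerate ir.2).foldl (stepCell ir.1) acc) (none, none)

-- ===== PORT B =====
def locateRow (target : Int) (i : Int) (row : List Int) : Option (Int × Int) :=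
  (PySem.List.enumerate row).findSome?
    (fun je => if je.2 = target then some (i, je.1) else none)

def locate (grid : List (List Int)) (target : Int) : Option (Int × Int) :=
  (PySem.List.enumerate grid).findSome? (fun ir => locateRow target ir.1 ir.2)

def find_targets_alt (grid : List (List Int)) : (Option (Int × Int)) × (Option (Int × Int)) :=
  (locate grid 83, locate grid 69)

-- ===== PRECONDITION & SPEC =====
-- Pre_ excludes grids with a duplicated marker (more than one cell = 83 'S' or more
-- than one cell = 69 'E'): there which occurrence wins is an unspecified corner
-- (A returns the last occurrence, B the first; neither is the specified value).
def Pre_find_targets (grid : List (List Int)) : Prop :=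
  grid.flatten.count 83 ≤ 1 ∧ grid.flatten.count 69 ≤ 1
instance (grid : List (List Int)) : Decidable (Pre_find_targets grid) := by
  unfold Pre_find_targets; infer_instance

def pvWitness_find_targets : List (List Int) := [[97, 83], [69, 98]]

def Spec_find_targets (grid : List (List Int)) (out : (Option (Int × Int)) × (Option (Int × Int))) : Prop := out = find_targets_alt grid
instance (grid : List (List Int)) (out : (Option (Int × Int)) × (Option (Int × Int))) : Decidable (Spec_find_targets grid out) := by unfold Spec_find_targets; infer_instance

-- ===== CLAIM (what is proved, stated in full; the proofs are below) =====
def Claim_equal_find_targets : Prop := ∀ (grid : List (List Int)), Dom_find_targets grid → Pre_find_targets grid → Spec_find_targets grid (find_targets grid)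

-- ===== LEMMAS AND PROOFS =====
lemma stepCell_fst (i : Int) (acc : Option (Int × Int) × Option (Int × Int)) (c : Int × Int) :
    (stepCell i acc c).1 = ((if c.2 = 83 then some (i, c.1) else none).or acc.1) := by
  unfold stepCell; split_ifs with h1 h2 <;> simp_all

lemma stepCell_snd (i : Int) (acc : Option (Int × Int) × Option (Int × Int)) (c : Int × Int) :
    (stepCell i acc c).2 = ((if c.2 = 69 then some (i, c.1) else none).or acc.2) := by
  unfold stepCell; split_ifs with h1 h2 <;> simp_all

-- A's fold computes, for each marker, the LAST matching cell: a reverse findSome?.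
lemma rowFold (i : Int) (cells : List (Int × Int))
    (acc : Option (Int × Int) × Option (Int × Int)) :
    cells.foldl (stepCell i) acc =
      ((cells.reverse.findSome? (fun je => if je.2 = 83 then some (i, je.1) else none)).or acc.1,
       (cells.reverse.findSome? (fun je => if je.2 = 69 then some (i, je.1) else none)).or acc.2) := by
  induction cells generalizing acc with
  | nil => simp
  | cons c cs ih =>
      simp only [List.foldl_cons, ih, List.reverse_cons, List.findSome?_append]
      refine Prod.ext ?_ ?_ <;>
        simp [stepCell_fst, stepCell_snd, Option.or_assoc]

def revLocateRow (target : Int) (i : Int) (row : List Int) : Option (Int × Int) :=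
  (PySem.List.enumerate row).reverse.findSome?
    (fun je => if je.2 = target then some (i, je.1) else none)

lemma gridFold (rows : List (Int × List Int))
    (acc : Option (Int × Int) × Option (Int × Int)) :
    rows.foldl (fun acc ir => (PySem.List.enumerate ir.2).foldl (stepCell ir.1) acc) acc =
      ((rows.reverse.findSome? (fun ir => revLocateRow 83 ir.1 ir.2)).or acc.1,
       (rows.reverse.findSome? (fun ir => revLocateRow 69 ir.1 ir.2)).or acc.2) := by
  induction rows generalizing acc with
  | nil => simp
  | cons r rs ih =>
      simp only [List.foldl_cons, ih, List.reverse_cons, List.findSome?_append]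
      rw [rowFold]
      refine Prod.ext ?_ ?_ <;> simp [revLocateRow, Option.or_assoc]

-- If at most one element of l produces a value, scanning in reverse finds the same value.
lemma findSome?_reverse_of_unique {α β : Type} (f : α → Option β) (l : List α)
    (h : l.countP (fun x => (f x).isSome) ≤ 1) :
    l.reverse.findSome? f = l.findSome? f := by
  induction l with
  | nil => simp
  | cons x xs ih =>
      rw [List.countP_cons] at h
      cases hx : f x with
      | none =>
          simp only [hx, Option.isSome_none, Bool.false_eq_true, if_false, add_zero] at h
          simp [List.findSome?_append, ih h, hx]
      | some b =>
          simp only [hx, Option.isSome_some, if_true] at h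
          have h0 : xs.countP (fun x => (f x).isSome) = 0 := by omega
          have hnone : xs.findSome? f = none := by
            rw [List.findSome?_eq_none_iff]
            intro a ha
            have := List.countP_eq_zero.mp h0 a ha
            simpa using this
          have hnone' : xs.reverse.findSome? f = none := by
            rw [List.findSome?_eq_none_iff] at hnone ⊢
            intro a ha; exact hnone a (List.mem_reverse.mp ha)
          simp [List.findSome?_append, hnone', hx]

lemma countP_enumerate_eq_count (row : List Int) (t : Int) (s : Int) :
    (PySem.List.enumerate row s).countP (fun je => je.2 = t) = row.count t := by
  induction row generalizing s with
  | nil => simp [PySem.List.enumerate_nil]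
  | cons a as ih =>
      rw [PySem.List.enumerate_cons, List.countP_cons, ih]
      by_cases h : a = t <;> simp [h]

lemma rowLocate_eq (t i : Int) (row : List Int) (hrow : row.count t ≤ 1) :
    revLocateRow t i row = locateRow t i row := by
  unfold revLocateRow locateRow
  apply findSome?_reverse_of_unique
  calc (PySem.List.enumerate row).countP
        (fun je => ((if je.2 = t then some (i, je.1) else none) : Option (Int × Int)).isSome)
      = (PySem.List.enumerate row).countP (fun je => je.2 = t) := by
        apply List.countP_congr; intro a _; by_cases h : a.2 = t <;> simp [h]
    _ = row.count t := countP_enumerate_eq_count row t 0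
    _ ≤ 1 := hrow

lemma countP_rows_le (grid : List (List Int)) (t : Int) (s : Int)
    (h : grid.flatten.count t ≤ 1) :
    (PySem.List.enumerate grid s).countP (fun ir => (locateRow t ir.1 ir.2).isSome) ≤ 1 := by
  induction grid generalizing s with
  | nil => simp [PySem.List.enumerate_nil]
  | cons r rs ih =>
      rw [List.flatten_cons, List.count_append] at h
      rw [PySem.List.enumerate_cons, List.countP_cons]
      have hsome : ∀ (i : Int) (row : List Int), (locateRow t i row).isSome = true → 1 ≤ row.count t := by
        intro i row hs
        unfold locateRow at hs
        rw [Option.isSome_iff_exists] at hs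
        obtain ⟨p, hp⟩ := hs
        obtain ⟨je, hmem, hje⟩ := List.exists_of_findSome?_eq_some hp
        have hjet : je.2 = t := by
          by_cases h' : je.2 = t
          · exact h'
          · simp [h'] at hje
        have : je.2 ∈ row := by
          have := congrArg (List.map Prod.snd) (rfl : PySem.List.enumerate row 0 = PySem.List.enumerate row 0)
          have hm : je.2 ∈ (PySem.List.enumerate row 0).map Prod.snd := List.mem_map_of_mem hmem
          rwa [PySem.List.map_snd_enumerate] at hm
        rw [← hjet]
        exact List.one_le_count_iff.mpr this
      by_cases hr : (locateRow t s r).isSome = true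
      · have h1 := hsome s r hr
        have h0 : rs.flatten.count t = 0 := by omega
        have : (PySem.List.enumerate rs (s + 1)).countP (fun ir => (locateRow t ir.1 ir.2).isSome) = 0 := by
          rw [List.countP_eq_zero]
          intro ir hmem
          simp only [Bool.not_eq_true, Option.isSome_eq_false_iff, Option.isNone_iff_eq_none]
          by_contra hne
          have hs' : (locateRow t ir.1 ir.2).isSome = true := Option.isSome_iff_ne_none.mpr hne
          have h1' := hsome ir.1 ir.2 hs'
          have hrmem : ir.2 ∈ rs := by
            rw [PySem.List.mem_enumerate_iff] at hmem
            obtain ⟨k, hk, hp⟩ := hmem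
            rw [hp]; exact List.getElem_mem hk
          have : ir.2.count t ≤ rs.flatten.count t := by
            rw [List.count_flatten]
            exact List.le_sum_of_mem (List.mem_map_of_mem hrmem)
          omega
        simp [hr, this]
      · simp only [hr]
        apply ih
        omega

lemma findSome?_congr' {α β : Type} (f g : α → Option β) (l : List α)
    (h : ∀ a ∈ l, f a = g a) : l.findSome? f = l.findSome? g := by
  induction l with
  | nil => simp
  | cons a as ih =>
      rw [List.findSome?_cons, List.findSome?_cons, h a (by simp)]
      cases g a <;> simp [ih (fun x hx => h x (by simp [hx]))]

lemma locate_unique (grid : List (List Int)) (t : Int) (h : grid.flatten.count t ≤ 1) :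
    (PySem.List.enumerate grid).reverse.findSome? (fun ir => revLocateRow t ir.1 ir.2)
      = locate grid t := by
  have hrow : ∀ ir ∈ PySem.List.enumerate grid, revLocateRow t ir.1 ir.2 = locateRow t ir.1 ir.2 := by
    intro ir hmem
    apply rowLocate_eq
    have hrmem : ir.2 ∈ grid := by
      rw [PySem.List.mem_enumerate_iff] at hmem
      obtain ⟨k, hk, hp⟩ := hmem
      rw [hp]; exact List.getElem_mem hk
    have : ir.2.count t ≤ grid.flatten.count t := by
      rw [List.count_flatten]
      exact List.le_sum_of_mem (List.mem_map_of_mem hrmem)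
    omega
  have hcongr : (PySem.List.enumerate grid).reverse.findSome? (fun ir => revLocateRow t ir.1 ir.2)
      = (PySem.List.enumerate grid).reverse.findSome? (fun ir => locateRow t ir.1 ir.2) := by
    apply findSome?_congr'
    intro ir hmem
    exact hrow ir (List.mem_reverse.mp hmem)
  rw [hcongr]
  unfold locate
  exact findSome?_reverse_of_unique _ _ (countP_rows_le grid t 0 h)

-- ===== VERDICT (by name: the statement is the Claim_ definition above) =====
theorem find_targets_spec : Claim_equal_find_targets := by
  intro grid _ hpre
  show find_targets grid = find_targets_alt grid
  obtain ⟨h83, h69⟩ := hpre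
  simp only [find_targets, find_targets_alt, gridFold, Option.or_none]
  rw [locate_unique grid 83 h83, locate_unique grid 69 h69]
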